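-- pv_equiv track=rewrite | github.com/turnkeyfriend/cs50Python | plates.py | is_valid
-- ===== SOURCE A (Python) =====
-- def is_valid(vanity):
--
-- #Check that length is between 2-6 characters
--     if len(vanity) < 2 or len(vanity) > 6:
--         return False
--
-- #Check that first 2 characters are not numbers
--     if vanity[0].isalpha() == False or vanity[1].isalpha() == False:
--         return False
--
-- #Check that the first number isn't a zero
--     for i in range(len(vanity)):
--         if vanity[i].isalpha() == False:
--             if vanity[i] == "0":
--                 return False
--             else:
--                 break
-- #Check that after a number is seen, characters after are not letters
--     for i in range(len(vanity)):
--         if vanity[i].isdigit():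
--             if not vanity[i:].isdigit():
--                 return False
--
-- #Check that there are no non-alphanumeric characters
--     if vanity.isalnum() == False:
--         return False
--
-- #If none of the test fail (are false) the return True to the main function
--     return True
-- ===== SOURCE B (Python) =====
-- def is_valid(vanity):
--     if not (2 <= len(vanity) <= 6):
--         return False
--     if not (vanity[0].isalpha() and vanity[1].isalpha()):
--         return False
--     if not vanity.isalnum():
--         return False
--     seen_digit = False
--     for c in vanity:
--         if c.isdigit():
--             if not seen_digit and c == "0":
--                 return False
--             seen_digit = True
--         elif seen_digit:
--             return False
--     return True
-- ===== Notes on version B (the rewrite author's own statement) =====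
-- stated objective: simpler
-- what changed: Replaces A's two separate index loops (including O(n^2) suffix .isdigit() re-checks) with a single left-to-right pass maintaining one seen_digit flag, after hoisting the isalnum check.
import Mathlib
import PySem

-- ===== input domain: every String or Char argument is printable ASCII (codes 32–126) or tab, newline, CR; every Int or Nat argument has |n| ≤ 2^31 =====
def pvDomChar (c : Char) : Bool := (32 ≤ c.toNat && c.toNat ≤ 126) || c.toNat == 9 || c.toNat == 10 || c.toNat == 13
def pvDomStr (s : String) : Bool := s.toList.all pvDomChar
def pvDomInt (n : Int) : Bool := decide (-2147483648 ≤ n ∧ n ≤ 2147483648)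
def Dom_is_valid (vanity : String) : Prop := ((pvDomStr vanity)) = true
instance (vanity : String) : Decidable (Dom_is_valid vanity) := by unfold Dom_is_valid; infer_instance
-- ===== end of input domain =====

-- B replaces A's two index loops (with O(n^2) suffix .isdigit() re-checks) by one
-- left-to-right pass carrying a seen_digit flag — objective: simpler.

-- ===== PORT A =====
-- first Python loop: find the first non-letter; reject iff it is "0", else break
def pvLoopZero : List Char → Bool
  | [] => true
  | c :: rest =>
    if PySem.Chars.isalpha c = false then
      (if c = '0' then false else true)
    else pvLoopZero rest

-- second Python loop: vanity[i:] is the suffix at the current position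
def pvLoopSuffix : List Char → Bool
  | [] => true
  | c :: rest =>
    if PySem.Chars.isdigit c then
      (if !(PySem.Chars.strIsdigit (c :: rest)) then false else pvLoopSuffix rest)
    else pvLoopSuffix rest

def is_valid (vanity : String) : Bool :=
  let s := vanity.toList
  if s.length < 2 || s.length > 6 then false
  else
    match PySem.List.pyGet? s 0, PySem.List.pyGet? s 1 with
    | some c0, some c1 =>
      if PySem.Chars.isalpha c0 = false || PySem.Chars.isalpha c1 = false then false
      else if pvLoopZero s = false then false
      else if pvLoopSuffix s = false then false
      else if PySem.Chars.strIsalnum s = false then false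
      else true
    | _, _ => false   -- unreachable: length ≥ 2

-- ===== PORT B =====
-- the single stateful pass of Source B (seen_digit accumulator)
def pvScan : List Char → Bool → Bool
  | [], _ => true
  | c :: rest, seen =>
    if PySem.Chars.isdigit c then
      (if !seen && c = '0' then false else pvScan rest true)
    else if seen then false
    else pvScan rest seen

def is_valid_alt (vanity : String) : Bool :=
  let s := vanity.toList
  if !(2 ≤ s.length && s.length ≤ 6) then false
  else
    match PySem.List.pyGet? s 0 with
    | none => false   -- unreachable: length ≥ 2
    | some c0 =>
      match PySem.List.pyGet? s 1 with
      | none => false   -- unreachable: length ≥ 2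
      | some c1 =>
        if !(PySem.Chars.isalpha c0 && PySem.Chars.isalpha c1) then false
        else if !(PySem.Chars.strIsalnum s) then false
        else pvScan s false

-- ===== PRECONDITION & SPEC =====
def Spec_is_valid (vanity : String) (out : Bool) : Prop := out = is_valid_alt vanity
instance (vanity : String) (out : Bool) : Decidable (Spec_is_valid vanity out) := by unfold Spec_is_valid; infer_instance

-- ===== CLAIM (what is proved, stated in full; the proofs are below) =====
def Claim_equal_is_valid : Prop := ∀ (vanity : String), Dom_is_valid vanity → Spec_is_valid vanity (is_valid vanity)

-- ===== LEMMAS AND PROOFS =====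

theorem isalpha_eq_false_of_isdigit {c : Char} (h : PySem.Chars.isdigit c = true) :
    PySem.Chars.isalpha c = false := by
  simp [PySem.Chars.isdigit, Char.le_def, UInt32.le_iff_toNat_le] at h
  simp [PySem.Chars.isalpha, PySem.Chars.isupper, PySem.Chars.islower, Char.le_def,
    UInt32.le_iff_toNat_le]
  omega

theorem pvLoopSuffix_of_all_digits {s : List Char}
    (h : s.all PySem.Chars.isdigit = true) : pvLoopSuffix s = true := by
  induction s with
  | nil => rfl
  | cons c rest ih =>
    simp only [List.all_cons, Bool.and_eq_true] at h
    simp [pvLoopSuffix, h.1, PySem.Chars.strIsdigit, List.all_cons, h.2,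
      ih h.2]

-- pvScan s false agrees with A's two loops, and pvScan s true demands an all-digit tail,
-- on all-alphanumeric input
theorem pvScan_eq {s : List Char} (h : s.all PySem.Chars.isalnum = true) :
    pvScan s false = (pvLoopZero s && pvLoopSuffix s) ∧
    pvScan s true = s.all PySem.Chars.isdigit := by
  induction s with
  | nil => exact ⟨rfl, rfl⟩
  | cons c rest ih =>
    simp only [List.all_cons, Bool.and_eq_true] at h
    obtain ⟨ih1, ih2⟩ := ih h.2
    by_cases hd : PySem.Chars.isdigit c = true
    · have ha := isalpha_eq_false_of_isdigit hd
      constructor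
      · by_cases hz : c = '0'
        · subst hz
          simp [pvScan, pvLoopZero, (by decide : PySem.Chars.isdigit '0' = true),
            (by decide : PySem.Chars.isalpha '0' = false)]
        · simp only [pvScan, pvLoopZero, pvLoopSuffix, hd, ha, hz, ih2,
            PySem.Chars.strIsdigit, List.all_cons]
          by_cases ht : rest.all PySem.Chars.isdigit = true
          · simp [ht, pvLoopSuffix_of_all_digits ht]
          · simp [Bool.not_eq_true] at ht
            simp [ht]
      · simp only [pvScan, pvLoopSuffix, hd, ih2, PySem.Chars.strIsdigit,
          List.all_cons]
        by_cases ht : rest.all PySem.Chars.isdigit = true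
        · simp [ht, hd]
        · simp [Bool.not_eq_true] at ht
          simp [ht, hd]
    · simp only [Bool.not_eq_true] at hd
      have ha : PySem.Chars.isalpha c = true := by
        have h1 := h.1
        simp only [PySem.Chars.isalnum, hd, Bool.or_false] at h1
        exact h1
      exact ⟨by simp [pvScan, pvLoopZero, pvLoopSuffix, hd, ha, ih1],
             by simp [pvScan, pvLoopSuffix, hd]⟩

-- ===== VERDICT (by name: the statement is the Claim_ definition above) =====
theorem is_valid_spec : Claim_equal_is_valid := by
  intro vanity _
  unfold Spec_is_valid is_valid is_valid_alt
  generalize vanity.toList = s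
  rcases s with _ | ⟨c0, _ | ⟨c1, rest⟩⟩
  · simp
  · simp
  · by_cases h6 : (c0 :: c1 :: rest).length > 6
    · simp only [List.length_cons, gt_iff_lt] at h6
      have g1 : (decide ((c0 :: c1 :: rest).length < 2)
          || decide ((c0 :: c1 :: rest).length > 6)) = true := by simp; omega
      have g2 : (!(decide (2 ≤ (c0 :: c1 :: rest).length)
          && decide ((c0 :: c1 :: rest).length ≤ 6))) = true := by simp; omega
      simp only [g1, g2, if_true]
    · simp only [List.length_cons, gt_iff_lt, not_lt] at h6
      have g1 : (decide ((c0 :: c1 :: rest).length < 2)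
          || decide ((c0 :: c1 :: rest).length > 6)) = false := by simp; omega
      have g2 : (!(decide (2 ≤ (c0 :: c1 :: rest).length)
          && decide ((c0 :: c1 :: rest).length ≤ 6))) = false := by simp; omega
      have hnn : (0:Int) ≤ (rest.length : Int) + 1 := by positivity
      have hg0 : PySem.List.pyGet? (c0 :: c1 :: rest) 0 = some c0 := by
        simp [PySem.List.pyGet?, PySem.List.pyIdx?, hnn]
      have hg1 : PySem.List.pyGet? (c0 :: c1 :: rest) 1 = some c1 := by
        simp [PySem.List.pyGet?, PySem.List.pyIdx?, hnn]
      simp only [g1, g2, Bool.false_eq_true, if_false, hg0, hg1]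
      by_cases ha : (PySem.Chars.isalpha c0 = false ∨ PySem.Chars.isalpha c1 = false)
      · rcases ha with h | h <;> simp [h]
      · rw [not_or] at ha
        simp only [Bool.not_eq_false] at ha
        simp only [ha.1, ha.2, Bool.and_self]
        by_cases han : PySem.Chars.strIsalnum (c0 :: c1 :: rest) = true
        · have hall : (c0 :: c1 :: rest).all PySem.Chars.isalnum = true := by
            simp [PySem.Chars.strIsalnum] at han; simpa using han
          have hq := (pvScan_eq hall).1
          simp only [han, hq]
          cases hz : pvLoopZero (c0 :: c1 :: rest) <;>
            cases hsf : pvLoopSuffix (c0 :: c1 :: rest) <;> simp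
        · simp only [Bool.not_eq_true] at han
          simp only [han, Bool.false_eq_true, if_false, Bool.not_false, if_true]
          cases hz : pvLoopZero (c0 :: c1 :: rest) <;>
            cases hsf : pvLoopSuffix (c0 :: c1 :: rest) <;> simp
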